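-- pv_equiv track=rewrite | github.com/bahgat-ahmed/Problem-Solving-in-Python | AlgoExpert/GenerateDocument_24_2.py | generateDocument
-- ===== SOURCE A (Python) =====
-- def generateDocument(characters, document):
-- 	char_freq = dict()
-- 	for char in characters:
-- 		if char not in char_freq:
-- 			char_freq[char] = 0
-- 		char_freq[char] += 1
--
-- 	for char in document:
-- 		if char not in char_freq or char_freq[char] == 0:
-- 			return False
--
-- 		char_freq[char] -= 1
--
-- 	return True
-- ===== SOURCE B (Python) =====
-- def generateDocument(characters, document):
-- 	available = {}
-- 	for ch in characters:
-- 		available[ch] = available.get(ch, 0) + 1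
-- 	needed = {}
-- 	for ch in document:
-- 		needed[ch] = needed.get(ch, 0) + 1
-- 	return all(cnt <= available.get(ch, 0) for ch, cnt in needed.items())
-- ===== Notes on version B (the rewrite author's own statement) =====
-- stated objective: idiomatic
-- what changed: Replaced the incremental decrement-and-early-return scan over a mutable frequency dict by building two full frequency tables (available and needed) and then doing one comparison pass: every needed count must not exceed the available count.
import Mathlib
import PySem

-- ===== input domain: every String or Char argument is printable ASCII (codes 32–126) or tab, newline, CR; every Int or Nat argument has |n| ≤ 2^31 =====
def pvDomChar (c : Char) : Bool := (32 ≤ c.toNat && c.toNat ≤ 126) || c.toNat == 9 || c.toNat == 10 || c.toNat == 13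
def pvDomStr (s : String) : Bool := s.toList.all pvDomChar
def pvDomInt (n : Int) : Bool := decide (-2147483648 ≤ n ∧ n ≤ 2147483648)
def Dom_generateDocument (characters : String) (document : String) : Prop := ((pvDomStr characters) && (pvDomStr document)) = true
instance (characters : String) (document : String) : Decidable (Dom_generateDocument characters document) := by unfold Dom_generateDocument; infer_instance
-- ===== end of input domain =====

-- B builds two full frequency tables and compares them in one pass, instead of A's
-- decrement-and-early-return scan; same cost, more idiomatic decomposition.

-- ===== PORT A =====
-- the 'for char in document: …' loop with its early 'return False'
def gdLoopA (d : PySem.Dict Char Int) : List Char → Bool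
  | [] => true
  | c :: rest =>
    if d.contains c = false ∨ d.getD c 0 = 0 then false
    else gdLoopA (d.insert c (d.getD c 0 - 1)) rest

def generateDocument (characters : String) (document : String) : Bool :=
  let charFreq : PySem.Dict Char Int := characters.toList.foldl
    (fun d c =>
      let d1 := if d.contains c = false then d.insert c 0 else d
      d1.insert c (d1.getD c 0 + 1))
    PySem.Dict.empty
  gdLoopA charFreq document.toList

-- ===== PORT B =====
def gdCounts (s : String) : PySem.Dict Char Int :=
  s.toList.foldl (fun d c => d.insert c (d.getD c 0 + 1)) PySem.Dict.empty

def generateDocument_alt (characters : String) (document : String) : Bool :=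
  let available := gdCounts characters
  let needed := gdCounts document
  needed.items.all (fun p => p.2 ≤ available.getD p.1 0)

-- ===== PRECONDITION & SPEC =====
def Spec_generateDocument (characters : String) (document : String) (out : Bool) : Prop := out = generateDocument_alt characters document
instance (characters : String) (document : String) (out : Bool) : Decidable (Spec_generateDocument characters document out) := by unfold Spec_generateDocument; infer_instance

-- ===== CLAIM (what is proved, stated in full; the proofs are below) =====
def Claim_equal_generateDocument : Prop := ∀ (characters : String) (document : String), Dom_generateDocument characters document → Spec_generateDocument characters document (generateDocument characters document)

-- ===== LEMMAS AND PROOFS =====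

-- A's build step keeps getD = running count.
lemma gdBuildA_getD (chars : List Char) (d : PySem.Dict Char Int) (v : Char) :
    (chars.foldl (fun d c =>
      let d1 := if d.contains c = false then d.insert c 0 else d
      d1.insert c (d1.getD c 0 + 1)) d).getD v 0 = d.getD v 0 + chars.count v := by
  induction chars generalizing d with
  | nil => simp
  | cons x t ih =>
    simp only [List.foldl_cons, ih]
    by_cases hx : d.contains x = false
    · rw [if_pos hx]
      rw [PySem.Dict.getD_insert, PySem.Dict.getD_insert]
      have h0 : d.getD x 0 = 0 := PySem.Dict.getD_of_not_contains d 0 hx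
      by_cases hv : v = x
      · subst hv; simp [h0]; omega
      · simp [hv, Ne.symm hv]
        rw [PySem.Dict.getD_insert]; simp [hv]
    · rw [if_neg hx]
      rw [PySem.Dict.getD_insert]
      by_cases hv : v = x
      · subst hv; simp; ring
      · simp [hv, Ne.symm hv]

-- A's build only ever contains characters it has seen.
lemma gdBuildA_contains (chars : List Char) (d : PySem.Dict Char Int) (v : Char)
    (h : (chars.foldl (fun d c =>
      let d1 := if d.contains c = false then d.insert c 0 else d
      d1.insert c (d1.getD c 0 + 1)) d).contains v = false) :
    d.contains v = false ∧ v ∉ chars := by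
  induction chars generalizing d with
  | nil => simpa using h
  | cons x t ih =>
    simp only [List.foldl_cons] at h
    obtain ⟨h1, h2⟩ := ih _ h
    rw [PySem.Dict.contains_insert] at h1
    simp only [Bool.or_eq_false_iff, beq_eq_false_iff_ne, ne_eq] at h1
    obtain ⟨hvx, h1⟩ := h1
    by_cases hx : d.contains x = false
    · rw [if_pos hx] at h1
      rw [PySem.Dict.contains_insert] at h1
      simp only [Bool.or_eq_false_iff, beq_eq_false_iff_ne, ne_eq] at h1
      exact ⟨h1.2, by simp [List.mem_cons, hvx, h2]⟩
    · rw [if_neg hx] at h1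
      exact ⟨h1, by simp [List.mem_cons, hvx, h2]⟩

-- A's scan over the document equals the count comparison, for any dict whose
-- values are nonnegative and whose absent keys read as 0.
lemma gdLoopA_eq (doc : List Char) (d : PySem.Dict Char Int)
    (hc : ∀ c, d.contains c = false → d.getD c 0 = 0)
    (hn : ∀ c, 0 ≤ d.getD c 0) :
    gdLoopA d doc = decide (∀ c ∈ doc, (doc.count c : Int) ≤ d.getD c 0) := by
  induction doc generalizing d with
  | nil => simp [gdLoopA]
  | cons c rest ih =>
    by_cases hz : d.contains c = false ∨ d.getD c 0 = 0
    · have h0 : d.getD c 0 = 0 := by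
        rcases hz with h | h
        · exact hc c h
        · exact h
      have hnall : ¬ (∀ x ∈ c :: rest, ((c :: rest).count x : Int) ≤ d.getD x 0) := by
        intro hall
        have := hall c (by simp)
        rw [h0] at this
        have hcnt : 1 ≤ (c :: rest).count c := by simp
        omega
      simp only [gdLoopA]
      rw [if_pos hz, decide_eq_false hnall]
    · have hpos : 0 < d.getD c 0 := by
        have := hn c
        have hne : d.getD c 0 ≠ 0 := fun h => hz (Or.inr h)
        omega
      have step : gdLoopA d (c :: rest) = gdLoopA (d.insert c (d.getD c 0 - 1)) rest := by
        simp [gdLoopA, hz]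
      rw [step, ih]
      · congr 1
        apply propext
        constructor
        · intro hall x hx
          by_cases hxc : x = c
          · subst hxc
            have hr : ((rest.count x : Int)) ≤ (d.insert x (d.getD x 0 - 1)).getD x 0 := by
              by_cases hm : x ∈ rest
              · exact hall x hm
              · rw [PySem.Dict.getD_insert]
                simp [List.count_eq_zero_of_not_mem hm]
                omega
            rw [PySem.Dict.getD_insert, if_pos rfl] at hr
            rw [List.count_cons_self]
            push_cast
            omega
          · rcases List.mem_cons.mp hx with h | h
            · exact absurd h hxc
            · have hr := hall x h
              rw [PySem.Dict.getD_insert] at hr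
              rw [if_neg hxc] at hr
              rw [List.count_cons_of_ne (fun hcc => hxc hcc.symm)]
              exact hr
        · intro hall x hx
          by_cases hxc : x = c
          · subst hxc
            have hr := hall x (List.mem_cons_self)
            rw [List.count_cons_self] at hr
            rw [PySem.Dict.getD_insert, if_pos rfl]
            push_cast at hr
            omega
          · have hr := hall x (List.mem_cons_of_mem _ hx)
            rw [List.count_cons_of_ne (fun hcc => hxc hcc.symm)] at hr
            rw [PySem.Dict.getD_insert, if_neg hxc]
            exact hr
      · intro x hx
        by_cases hxc : x = c
        · subst hxc
          rw [PySem.Dict.contains_insert] at hx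
          simp at hx
        · rw [PySem.Dict.getD_insert]
          rw [if_neg hxc]
          apply hc
          rw [PySem.Dict.contains_insert] at hx
          simp only [Bool.or_eq_false_iff] at hx
          exact hx.2
      · intro x
        rw [PySem.Dict.getD_insert]
        by_cases hxc : x = c
        · simp [hxc]; omega
        · simp [hxc]; exact hn x

-- B's counting loop is the library counter.
lemma gdCounts_eq (s : String) : gdCounts s = PySem.Dict.counter s.toList :=
  PySem.Dict.foldl_insert_getD_add_one_eq_counter s.toList

-- ===== VERDICT (by name: the statement is the Claim_ definition above) =====
theorem generateDocument_spec : Claim_equal_generateDocument := by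
  intro characters document _
  unfold Spec_generateDocument generateDocument generateDocument_alt
  rw [gdLoopA_eq]
  · simp only [gdCounts_eq, PySem.Dict.items_counter, List.all_map]
    rw [Bool.eq_iff_iff]
    simp only [List.all_eq_true, decide_eq_true_eq, Function.comp, PySem.Set.mem_ofList,
      PySem.Dict.getD_counter, gdBuildA_getD, PySem.Dict.getD_empty, zero_add, Int.ofNat_le]
  · intro c hcf
    obtain ⟨-, hnm⟩ := gdBuildA_contains characters.toList PySem.Dict.empty c hcf
    rw [gdBuildA_getD]
    simp [List.count_eq_zero_of_not_mem hnm]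
  · intro c
    rw [gdBuildA_getD]
    simp
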